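-- pv_equiv track=rewrite | github.com/richardbartos/advent-of-code-2024 | day02.py | all_but_one_equal
-- ===== SOURCE A (Python) =====
-- def all_but_one_equal(arr):
--     counts = [0] * len(arr)
--     unique_elements = []
--
--     for item in arr:
--         if item in unique_elements:
--             counts[unique_elements.index(item)] += 1
--         else:
--             unique_elements.append(item)
--             counts[unique_elements.index(item)] = 1
--
--     most_common_type = max(counts)
--
--     return most_common_type == len(arr) or most_common_type == len(arr) - 1
-- ===== SOURCE B (Python) =====
-- def all_but_one_equal(arr):
--     # Boyer-Moore majority vote: one streaming pass to find a candidate,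
--     # one verification pass counting its occurrences.
--     candidate = None
--     count = 0
--     for item in arr:
--         if count == 0:
--             candidate = item
--             count = 1
--         elif item == candidate:
--             count += 1
--         else:
--             count -= 1
--     occurrences = sum(1 for item in arr if item == candidate)
--     return occurrences >= len(arr) - 1
-- ===== Notes on version B (the rewrite author's own statement) =====
-- stated objective: faster
-- what changed: Replaced A's quadratic build of a unique-elements list with repeated 'in'/'.index' linear scans by a Boyer-Moore majority vote: one streaming pass finds a candidate, one counting pass verifies it.
import Mathlib
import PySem

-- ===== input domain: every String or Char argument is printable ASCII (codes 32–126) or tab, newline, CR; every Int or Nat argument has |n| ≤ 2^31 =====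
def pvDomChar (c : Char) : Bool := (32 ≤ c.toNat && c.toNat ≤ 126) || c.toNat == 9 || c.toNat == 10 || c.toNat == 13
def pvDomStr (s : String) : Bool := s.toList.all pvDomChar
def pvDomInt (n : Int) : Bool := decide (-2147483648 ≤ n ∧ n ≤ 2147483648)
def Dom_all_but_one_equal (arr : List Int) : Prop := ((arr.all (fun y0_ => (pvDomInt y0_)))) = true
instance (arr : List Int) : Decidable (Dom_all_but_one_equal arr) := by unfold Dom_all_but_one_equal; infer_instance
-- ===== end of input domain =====

-- B replaces A's quadratic unique-list/.index counting with a linear Boyer-Moore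
-- majority vote (candidate pass + verification pass); return value only, no mutation.

-- ===== PORT A =====
-- loop body of A: 'if item in unique_elements: counts[...] += 1 else: append; counts[...] = 1'
def pvStepA (s : List Int × List Int) (item : Int) : List Int × List Int :=
  match PySem.List.index? s.2 item with
  | some i => (PySem.List.pySetD s.1 (i : Int) (PySem.List.pyGetD s.1 (i : Int) 0 + 1), s.2)
  | none =>
    let uniq' := s.2 ++ [item]
    match PySem.List.index? uniq' item with
    | some i => (PySem.List.pySetD s.1 (i : Int) 1, uniq')
    | none => (s.1, uniq')  -- unreachable: item ∈ uniq'

def all_but_one_equal (arr : List Int) : Bool :=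
  let st := arr.foldl pvStepA (List.replicate arr.length 0, [])
  match PySem.List.max? st.1 (fun x => x) with
  | some m => decide (m = (arr.length : Int) ∨ m = (arr.length : Int) - 1)
  | none => false  -- max([]) raises ValueError: excluded by Pre_

-- ===== PORT B =====
-- loop body of B: the Boyer-Moore vote step
def pvStepB (s : Option Int × Int) (item : Int) : Option Int × Int :=
  if s.2 = 0 then (some item, 1)
  else if some item = s.1 then (s.1, s.2 + 1)
  else (s.1, s.2 - 1)

def all_but_one_equal_alt (arr : List Int) : Bool :=
  let st := arr.foldl pvStepB (none, 0)
  let occ : Int := arr.foldl (fun acc item => if some item = st.1 then acc + 1 else acc) 0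
  decide ((arr.length : Int) - 1 ≤ occ)

-- ===== PRECONDITION & SPEC =====
-- A raises ValueError (max of empty sequence) on the empty list; Pre_ excludes exactly that.
def Pre_all_but_one_equal (arr : List Int) : Prop := arr ≠ []
instance (arr : List Int) : Decidable (Pre_all_but_one_equal arr) := by unfold Pre_all_but_one_equal; infer_instance
def pvWitness_all_but_one_equal : List Int := ([1, 1, 2])

def Spec_all_but_one_equal (arr : List Int) (out : Bool) : Prop := out = all_but_one_equal_alt arr
instance (arr : List Int) (out : Bool) : Decidable (Spec_all_but_one_equal arr out) := by unfold Spec_all_but_one_equal; infer_instance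

-- ===== CLAIM (what is proved, stated in full; the proofs are below) =====
def Claim_equal_all_but_one_equal : Prop := ∀ (arr : List Int), Dom_all_but_one_equal arr → Pre_all_but_one_equal arr → Spec_all_but_one_equal arr (all_but_one_equal arr)

-- ===== LEMMAS AND PROOFS =====

lemma pvCountApp (p : List Int) (a x : Int) :
    ((p ++ [a]).count x : Int) = (p.count x : Int) + (if x = a then 1 else 0) := by
  rcases eq_or_ne x a with h | h
  · simp [List.count_append, h]
  · simp [List.count_append, h, List.count_eq_zero_of_not_mem]

lemma pvLenApp (p : List Int) (a : Int) :
    (((p ++ [a]).length : Int)) = (p.length : Int) + 1 := by simp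

lemma pvBInv (l : List Int) : ∀ (cand : Option Int) (cnt : Int) (p : List Int),
    0 ≤ cnt →
    (∀ c, cand = some c → c ∈ p) →
    (cand = none → p = []) →
    (∀ x : Int, 2 * (p.count x : Int) ≤ (p.length : Int) + (if some x = cand then cnt else -cnt)) →
    ∃ cand' cnt',
      l.foldl pvStepB (cand, cnt) = (cand', cnt') ∧
      0 ≤ cnt' ∧
      (∀ c, cand' = some c → c ∈ p ++ l) ∧
      (cand' = none → p ++ l = []) ∧
      (∀ x : Int, 2 * ((p ++ l).count x : Int) ≤ ((p ++ l).length : Int) + (if some x = cand' then cnt' else -cnt')) := by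
  induction l with
  | nil =>
    intro cand cnt p h0 hc hn hb
    exact ⟨cand, cnt, rfl, h0, by simpa using hc, by simpa using hn, by simpa using hb⟩
  | cons a l ih =>
    intro cand cnt p h0 hc hn hb
    rw [List.foldl_cons]
    by_cases hz : cnt = 0
    · have hstep : pvStepB (cand, cnt) a = (some a, 1) := by simp [pvStepB, hz]
      rw [hstep]
      obtain ⟨cand', cnt', heq, h0', hc', hn', hb'⟩ :=
        ih (some a) 1 (p ++ [a]) (by omega)
          (by intro c hcc; injection hcc with h'; subst h'; simp)
          (by simp)
          (by
            intro x
            have hx := hb x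
            rw [pvCountApp, pvLenApp]
            simp only [Option.some.injEq] at hx ⊢
            split_ifs at hx ⊢ <;> omega)
      refine ⟨cand', cnt', heq, h0', ?_, ?_, ?_⟩
      · intro c h; have := hc' c h; simpa [List.append_assoc] using this
      · intro h; have := hn' h; simp [List.append_assoc] at this
      · intro x; have := hb' x; simpa [List.append_assoc] using this
    · obtain ⟨c0, rfl⟩ : ∃ c0, cand = some c0 := by
        cases cand with
        | none => exfalso; have := hb 0; simp [hn rfl] at this; omega
        | some c0 => exact ⟨c0, rfl⟩
      by_cases hac : a = c0
      · have hstep : pvStepB (some c0, cnt) a = (some c0, cnt + 1) := by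
          simp [pvStepB, hz, hac]
        rw [hstep]
        obtain ⟨cand', cnt', heq, h0', hc', hn', hb'⟩ :=
          ih (some c0) (cnt + 1) (p ++ [a]) (by omega)
            (by intro c hcc; injection hcc with h'; subst h';
                exact List.mem_append_left _ (hc _ rfl))
            (by simp)
            (by
              intro x
              have hx := hb x
              rw [pvCountApp, pvLenApp]
              simp only [Option.some.injEq] at hx ⊢
              split_ifs at hx ⊢ <;> omega)
        refine ⟨cand', cnt', heq, h0', ?_, ?_, ?_⟩
        · intro c h; have := hc' c h; simpa [List.append_assoc] using this
        · intro h; have := hn' h; simp [List.append_assoc] at this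
        · intro x; have := hb' x; simpa [List.append_assoc] using this
      · have hstep : pvStepB (some c0, cnt) a = (some c0, cnt - 1) := by
          simp [pvStepB, hz, hac]
        rw [hstep]
        obtain ⟨cand', cnt', heq, h0', hc', hn', hb'⟩ :=
          ih (some c0) (cnt - 1) (p ++ [a]) (by omega)
            (by intro c hcc; injection hcc with h'; subst h';
                exact List.mem_append_left _ (hc _ rfl))
            (by simp)
            (by
              intro x
              have hx := hb x
              rw [pvCountApp, pvLenApp]
              simp only [Option.some.injEq] at hx ⊢
              split_ifs at hx ⊢ <;> omega)
        refine ⟨cand', cnt', heq, h0', ?_, ?_, ?_⟩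
        · intro c h; have := hc' c h; simpa [List.append_assoc] using this
        · intro h; have := hn' h; simp [List.append_assoc] at this
        · intro x; have := hb' x; simpa [List.append_assoc] using this

lemma pvGetDSet (l : List Int) (i j : Nat) (v : Int) (h : i < l.length) :
    (l.set i v).getD j 0 = if j = i then v else l.getD j 0 := by
  rcases eq_or_ne j i with rfl | hne
  · simp [List.getD_eq_getElem?_getD, h]
  · simp [List.getD_eq_getElem?_getD, Ne.symm hne, hne]

lemma pvAInv (l : List Int) : ∀ (counts uniq p : List Int),
    uniq.Nodup →
    (∀ x, x ∈ uniq ↔ x ∈ p) →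
    uniq.length + l.length ≤ counts.length →
    (∀ i : Nat, counts.getD i 0 = if h2 : i < uniq.length then ((p.count uniq[i]) : Int) else 0) →
    ∃ counts' uniq',
      l.foldl pvStepA (counts, uniq) = (counts', uniq') ∧
      counts'.length = counts.length ∧
      uniq'.Nodup ∧
      (∀ x, x ∈ uniq' ↔ x ∈ p ++ l) ∧
      uniq'.length ≤ counts.length ∧
      (∀ i : Nat, counts'.getD i 0 = if h2 : i < uniq'.length then (((p ++ l).count uniq'[i]) : Int) else 0) := by
  induction l with
  | nil =>
    intro counts uniq p hnd hmem hlen hcnt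
    exact ⟨counts, uniq, rfl, rfl, hnd, by simpa using hmem, by simpa using hlen,
      by simpa using hcnt⟩
  | cons a l ih =>
    intro counts uniq p hnd hmem hlen hcnt
    rw [List.foldl_cons]
    by_cases ha : a ∈ uniq
    · obtain ⟨i0, hidx⟩ := (PySem.List.index?_isSome_iff uniq a).mpr ha |> Option.isSome_iff_exists.mp
      obtain ⟨hi0, hval, -⟩ := PySem.List.getElem_of_index?_eq_some hidx
      have hi0c : i0 < counts.length := by omega
      have hidx' : uniq.idxOf? a = some i0 := by simpa using hidx
      have hstep : pvStepA (counts, uniq) a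
          = (counts.set i0 (counts.getD i0 0 + 1), uniq) := by
        simp [pvStepA, hidx', List.getD_eq_getElem?_getD]
      rw [hstep]
      obtain ⟨counts', uniq', heq, hlen', hnd', hmem', hub', hcnt'⟩ :=
        ih (counts.set i0 (counts.getD i0 0 + 1)) uniq (p ++ [a]) hnd
          (by intro x
              constructor
              · intro hx; exact List.mem_append_left _ ((hmem x).mp hx)
              · intro hx
                rcases List.mem_append.mp hx with hx | hx
                · exact (hmem x).mpr hx
                · have hxa : x = a := by simpa using hx
                  subst hxa; exact ha)
          (by rw [List.length_set]; simp only [List.length_cons] at hlen; omega)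
          (by
            intro i
            rw [pvGetDSet _ _ _ _ hi0c]
            rcases eq_or_ne i i0 with rfl | hne
            · rw [if_pos rfl, hcnt i, dif_pos hi0, dif_pos hi0, hval, pvCountApp, if_pos rfl]
            · rw [if_neg hne, hcnt i]
              by_cases h2 : i < uniq.length
              · rw [dif_pos h2, dif_pos h2, pvCountApp,
                  if_neg (by
                    intro hcontra
                    exact hne ((List.Nodup.getElem_inj_iff hnd).mp (by rw [hcontra, hval]))),
                  add_zero]
              · rw [dif_neg h2, dif_neg h2])
      refine ⟨counts', uniq', heq, by simpa using hlen', hnd', ?_, hub'.trans (by simp), ?_⟩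
      · intro x; rw [hmem' x]; simp
      · intro i; rw [hcnt' i]; simp [List.append_assoc]
    · have hidx : PySem.List.index? uniq a = none := (PySem.List.index?_eq_none_iff _ _).mpr ha
      have hidx2 : PySem.List.index? (uniq ++ [a]) a = some uniq.length :=
        PySem.List.index?_append_singleton_self uniq a ha
      have hidx' : uniq.idxOf? a = none := by simpa using hidx
      have hidx2' : (uniq ++ [a]).idxOf? a = some uniq.length := by simpa using hidx2
      have hstep : pvStepA (counts, uniq) a = (counts.set uniq.length 1, uniq ++ [a]) := by
        simp [pvStepA, hidx', hidx2']
      rw [hstep]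
      have hulc : uniq.length < counts.length := by simp at hlen; omega
      have hap : a ∉ p := fun h => ha ((hmem a).mpr h)
      obtain ⟨counts', uniq', heq, hlen', hnd', hmem', hub', hcnt'⟩ :=
        ih (counts.set uniq.length 1) (uniq ++ [a]) (p ++ [a])
          (by simp [List.nodup_append, hnd]; exact fun y hy hya => ha (hya ▸ hy))
          (by intro x; simp [hmem x])
          (by simp at hlen ⊢; omega)
          (by
            intro i
            rw [pvGetDSet _ _ _ _ hulc]
            rcases eq_or_ne i uniq.length with rfl | hne
            · rw [if_pos rfl, dif_pos (by simp)]
              rw [List.getElem_concat_length rfl (by simp), pvCountApp, if_pos rfl,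
                List.count_eq_zero_of_not_mem hap]
              simp
            · rw [if_neg hne, hcnt i]
              by_cases h2 : i < uniq.length
              · rw [dif_pos h2, dif_pos (by simp; omega),
                  List.getElem_append_left h2, pvCountApp,
                  if_neg (fun (hc : uniq[i] = a) => ha (hc ▸ List.getElem_mem h2)), add_zero]
              · rw [dif_neg h2, dif_neg (by simp; omega)])
      refine ⟨counts', uniq', heq, by simpa using hlen', hnd', ?_, hub'.trans (by simp), ?_⟩
      · intro x; rw [hmem' x]; simp
      · intro i; rw [hcnt' i]; simp [List.append_assoc]

lemma pvAChar (arr : List Int) (h : arr ≠ []) :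
    all_but_one_equal arr
      = decide (∃ x ∈ arr, (arr.length : Int) - 1 ≤ (arr.count x : Int)) := by
  obtain ⟨counts', uniq', heq, hlenc, hnd', hmem', hub', hcnt'⟩ :=
    pvAInv arr (List.replicate arr.length 0) [] []
      List.nodup_nil (by simp) (by simp)
      (by intro i; simp [List.getD_eq_getElem?_getD, List.getElem?_replicate]
          split_ifs <;> rfl)
  have hmem'' : ∀ x, x ∈ uniq' ↔ x ∈ arr := by simpa using hmem'
  have hlen' : counts'.length = arr.length := by simpa using hlenc
  have hcnt'' : ∀ i : Nat, counts'.getD i 0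
      = if h2 : i < uniq'.length then ((arr.count uniq'[i]) : Int) else 0 := by
    intro i; simpa using hcnt' i
  have hub'' : uniq'.length ≤ arr.length := by simpa using hub'
  have hne : counts' ≠ [] := by
    intro hc; rw [hc] at hlen'; exact h (List.eq_nil_of_length_eq_zero hlen'.symm)
  obtain ⟨m, hm⟩ : ∃ m, PySem.List.max? counts' (fun x => x) = some m := by
    cases hmax : PySem.List.max? counts' (fun x => x) with
    | none => exact absurd ((PySem.List.max?_eq_none_iff _ _).mp hmax) hne
    | some m => exact ⟨m, rfl⟩
  have hub : ∀ y ∈ counts', y ≤ m := PySem.List.max?_isMax hm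
  -- every element's count is an element of counts'
  have hcount_le : ∀ x ∈ arr, ((arr.count x : Int)) ≤ m := by
    intro x hx
    obtain ⟨i, hi, hix⟩ := List.mem_iff_getElem.mp ((hmem'' x).mpr hx)
    have hic : i < counts'.length := by omega
    have : counts'.getD i 0 = (arr.count x : Int) := by
      rw [hcnt'' i, dif_pos hi, hix]
    have hmem : (arr.count x : Int) ∈ counts' := by
      rw [← this, List.getD_eq_getElem?_getD, List.getElem?_eq_getElem hic]
      exact List.getElem_mem hic
    exact hub _ hmem
  have hm_cases : (∃ x ∈ arr, ((arr.count x : Int)) = m) ∨ m = 0 := by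
    obtain ⟨j, hj, hjm⟩ := List.mem_iff_getElem.mp (PySem.List.max?_mem hm)
    have : counts'.getD j 0 = m := by
      rw [List.getD_eq_getElem?_getD, List.getElem?_eq_getElem hj, hjm]; rfl
    rw [hcnt'' j] at this
    by_cases h2 : j < uniq'.length
    · rw [dif_pos h2] at this
      exact Or.inl ⟨uniq'[j], (hmem'' _).mp (List.getElem_mem h2), this⟩
    · rw [dif_neg h2] at this; exact Or.inr this.symm
  have hmn : m ≤ (arr.length : Int) := by
    rcases hm_cases with ⟨x, _, hxm⟩ | hm0
    · have := List.count_le_length (l := arr) (a := x); omega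
    · have : 0 < arr.length := List.length_pos_iff.mpr h
      omega
  have hpos : 0 < arr.length := List.length_pos_iff.mpr h
  simp only [all_but_one_equal, heq, hm]
  simp only [decide_eq_decide]
  constructor
  · intro hor
    rcases hm_cases with ⟨x, hx, hxm⟩ | hm0
    · exact ⟨x, hx, by omega⟩
    · obtain ⟨y, hy⟩ := List.exists_mem_of_ne_nil arr h
      exact ⟨y, hy, by omega⟩
  · rintro ⟨x, hx, hxc⟩
    have h1 := hcount_le x hx
    omega

lemma pvOccCount (arr : List Int) (c : Int) :
    arr.foldl (fun acc item => if some item = (some c : Option Int) then acc + 1 else acc)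
      (0 : Int) = (arr.count c : Int) := by
  induction arr using List.reverseRecOn with
  | nil => simp
  | append_singleton l a ih =>
    rw [List.foldl_append, List.foldl_cons, List.foldl_nil, pvCountApp]
    rcases eq_or_ne a c with rfl | hne
    · rw [if_pos rfl, if_pos rfl, ih]
    · rw [if_neg (by simpa using hne), if_neg (by simpa using hne.symm), ih, add_zero]

-- ===== VERDICT (by name: the statement is the Claim_ definition above) =====
theorem all_but_one_equal_spec : Claim_equal_all_but_one_equal := by
  unfold Claim_equal_all_but_one_equal
  intro arr _ hpre
  unfold Spec_all_but_one_equal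
  obtain ⟨cand', cnt', heqB, h0', hcB, hnB, hbB⟩ :=
    pvBInv arr none 0 [] le_rfl (by simp) (by simp) (by simp)
  obtain ⟨c, rfl⟩ : ∃ c, cand' = some c := by
    cases cand' with
    | none => exact absurd (by simpa using hnB rfl) hpre
    | some c => exact ⟨c, rfl⟩
  have hcmem : c ∈ arr := by simpa using hcB c rfl
  have hBval : all_but_one_equal_alt arr
      = decide ((arr.length : Int) - 1 ≤ (arr.count c : Int)) := by
    simp only [all_but_one_equal_alt, heqB]
    rw [pvOccCount]
  rw [pvAChar arr hpre, hBval]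
  simp only [decide_eq_decide]
  have hcc : 0 < arr.count c := List.count_pos_iff.mpr hcmem
  constructor
  · rintro ⟨x, hx, hxc⟩
    rcases eq_or_ne x c with rfl | hne
    · exact hxc
    · have h2 := hbB x
      rw [if_neg (by simpa using hne)] at h2
      simp only [List.nil_append] at h2
      have h3 := List.count_le_length (l := arr) (a := x)
      omega
  · intro hge; exact ⟨c, hcmem, hge⟩
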